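-- pv_equiv track=rewrite | github.com/GuaraProductions/guara-docs | tools/merge-documents.py | split_by_front_matter
-- ===== SOURCE A (Python) =====
-- def split_by_front_matter(lines):
-- 	blocks = []
-- 	start_indices = []
--
-- 	def next_non_empty(idx):
-- 		while idx < len(lines) and lines[idx].strip() == "":
-- 			idx += 1
-- 		return idx
--
-- 	for idx, line in enumerate(lines):
-- 		if line.strip() != "---":
-- 			continue
-- 		next_idx = next_non_empty(idx + 1)
-- 		if next_idx >= len(lines):
-- 			continue
-- 		next_line = lines[next_idx]
-- 		if next_line.startswith("title:") or next_line.startswith("date:") or next_line.startswith("draft:"):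
-- 			start_indices.append(idx)
--
-- 	for i, start in enumerate(start_indices):
-- 		end = start_indices[i + 1] if i + 1 < len(start_indices) else len(lines)
-- 		block_lines = lines[start:end]
-- 		blocks.append("\n".join(block_lines).rstrip("\n") + "\n")
--
-- 	return blocks
-- ===== SOURCE B (Python) =====
-- def split_by_front_matter(lines):
-- 	n = len(lines)
-- 	# nxt[i] = smallest j >= i with lines[j].strip() != "", or n if none
-- 	nxt = [n] * (n + 1)
-- 	for i in range(n - 1, -1, -1):
-- 		nxt[i] = nxt[i + 1] if lines[i].strip() == "" else i
-- 	starts = [i for i, line in enumerate(lines)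
-- 	          if line.strip() == "---"
-- 	          and nxt[i + 1] < n
-- 	          and lines[nxt[i + 1]].startswith(("title:", "date:", "draft:"))]
-- 	bounds = starts + [n]
-- 	return ["\n".join(lines[a:b]).rstrip("\n") + "\n"
-- 	        for a, b in zip(bounds, bounds[1:])]
-- ===== Notes on version B (the rewrite author's own statement) =====
-- stated objective: alternative
-- what changed: B replaces A's per-'---' forward rescans for the next non-empty line with a single reverse-pass next-non-empty index array, builds the start indices as one comprehension, and pairs consecutive block boundaries by zipping instead of indexed lookups; it avoids A's quadratic worst case but was not measurably faster on the generated inputs.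
import Mathlib
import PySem

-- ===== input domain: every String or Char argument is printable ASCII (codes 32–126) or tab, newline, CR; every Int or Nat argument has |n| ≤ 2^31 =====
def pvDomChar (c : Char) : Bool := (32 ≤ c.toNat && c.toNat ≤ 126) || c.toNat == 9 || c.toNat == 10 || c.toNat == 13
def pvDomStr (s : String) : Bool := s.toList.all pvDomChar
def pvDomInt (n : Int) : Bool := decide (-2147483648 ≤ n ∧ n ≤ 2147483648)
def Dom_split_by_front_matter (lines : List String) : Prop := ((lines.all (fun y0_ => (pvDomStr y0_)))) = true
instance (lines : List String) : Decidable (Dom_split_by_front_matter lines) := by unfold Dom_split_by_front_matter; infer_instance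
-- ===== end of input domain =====

-- B replaces A's per-'---' forward rescans with a single reverse-pass next-non-empty index array and zip pairing of consecutive block boundaries.


-- exact port of str.rstrip("\n") (only '\n' is stripped): drop trailing '\n' characters; shared verbatim by both Pythons
def rstripNl (s : String) : String := String.ofList ((s.toList.reverse.dropWhile (· == '\n')).reverse)

-- the three startswith tests, shared verbatim by both Pythons
def fmStart (s : String) : Bool :=
  PySem.Str.startswith s "title:" || PySem.Str.startswith s "date:" || PySem.Str.startswith s "draft:"

-- ===== PORT A =====
-- A's inner helper next_non_empty: advance idx while lines[idx].strip() == ""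
def nneA (lines : List String) (idx : Nat) : Nat :=
  if h : idx < lines.length then
    if PySem.Str.strip lines[idx] = "" then nneA lines (idx + 1) else idx
  else idx
termination_by lines.length - idx

-- A's first loop: for idx, line in enumerate(lines), collect start_indices (continue branches in order)
def startsA (lines : List String) : List Nat :=
  lines.zipIdx.foldl (fun acc p =>
    if PySem.Str.strip p.1 ≠ "---" then acc
    else if lines.length ≤ nneA lines (p.2 + 1) then acc
    else if fmStart (lines.getD (nneA lines (p.2 + 1)) "") then acc ++ [p.2]
    else acc) []

-- A's second loop: for i, start in enumerate(start_indices): end = start_indices[i+1] if i+1 < len else len(lines)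
def buildA (lines : List String) (starts : List Nat) : List String :=
  starts.zipIdx.foldl (fun acc q =>
    acc ++ [rstripNl (PySem.Str.join "\n"
      (PySem.List.slice lines (some (q.1 : Int))
        (some ((if q.2 + 1 < starts.length then starts.getD (q.2 + 1) 0
                else lines.length) : Int)))) ++ "\n"]) []

def split_by_front_matter (lines : List String) : List String :=
  buildA lines (startsA lines)

-- ===== PORT B =====
-- B's reverse pass: nxtB lines i is the array [nxt[i], …, nxt[i+len(lines)]] of absolute indices;
-- entry j depends on entry j+1 exactly as B's right-to-left loop writes them
def nxtB (lines : List String) (i : Nat) : List Nat :=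
  match lines with
  | [] => [i]
  | l :: rest =>
      let tail := nxtB rest (i + 1)
      (if PySem.Str.strip l = "" then tail.headD (i + 1) else i) :: tail

-- B's comprehension: starts = [i for i, line in enumerate(lines) if …]
def startsB (lines : List String) : List Nat :=
  (lines.zipIdx.filter (fun p =>
    PySem.Str.strip p.1 = "---" &&
    (nxtB lines 0).getD (p.2 + 1) lines.length < lines.length &&
    fmStart (lines.getD ((nxtB lines 0).getD (p.2 + 1) lines.length) ""))).map Prod.snd

-- B's bounds = starts + [n]
def boundsB (lines : List String) : List Nat := startsB lines ++ [lines.length]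

def split_by_front_matter_alt (lines : List String) : List String :=
  ((boundsB lines).zip (boundsB lines).tail).map (fun q =>
    rstripNl (PySem.Str.join "\n"
      (PySem.List.slice lines (some (q.1 : Int)) (some (q.2 : Int)))) ++ "\n")

-- ===== PRECONDITION & SPEC =====
def Spec_split_by_front_matter (lines : List String) (out : List String) : Prop := out = split_by_front_matter_alt lines
instance (lines : List String) (out : List String) : Decidable (Spec_split_by_front_matter lines out) := by unfold Spec_split_by_front_matter; infer_instance

-- ===== CLAIM (what is proved, stated in full; the proofs are below) =====
def Claim_equal_split_by_front_matter : Prop := ∀ (lines : List String), Dom_split_by_front_matter lines → Spec_split_by_front_matter lines (split_by_front_matter lines)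

-- ===== LEMMAS AND PROOFS =====

-- shifting next_non_empty past a prepended line
theorem nneA_cons_succ (l : String) (rest : List String) (j : Nat) :
    nneA (l :: rest) (j + 1) = nneA rest j + 1 := by
  fun_induction nneA rest j with
  | case1 idx hlt hs ih =>
      rw [nneA]
      simp only [List.length_cons, List.getElem_cons_succ]
      rw [dif_pos (by omega), if_pos hs]
      exact ih
  | case2 idx hlt hs =>
      rw [nneA]
      simp only [List.length_cons, List.getElem_cons_succ]
      rw [dif_pos (by omega), if_neg hs]
  | case3 idx hlt =>
      rw [nneA]
      simp only [List.length_cons]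
      rw [dif_neg (by omega)]

-- B's next-non-empty array is exactly A's next_non_empty at every index
theorem nxtB_eq_map (lines : List String) (i : Nat) :
    nxtB lines i = (List.range (lines.length + 1)).map (fun j => i + nneA lines j) := by
  induction lines generalizing i with
  | nil =>
      simp [nxtB, List.range_succ, nneA]
  | cons l rest ih =>
      show (if PySem.Str.strip l = "" then (nxtB rest (i+1)).headD (i+1) else i) :: nxtB rest (i+1) = _
      rw [List.range_succ_eq_map, List.map_cons, List.map_map]
      congr 1
      · rw [ih]
        by_cases hs : PySem.Str.strip l = ""
        · rw [if_pos hs]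
          rw [List.range_succ_eq_map, List.map_cons, List.headD_cons]
          conv_rhs => rw [nneA]
          rw [dif_pos (by simp), if_pos (by simpa using hs)]
          rw [show (0:Nat) + 1 = 0 + 1 from rfl, nneA_cons_succ]
          omega
        · rw [if_neg hs]
          conv_rhs => rw [nneA]
          rw [dif_pos (by simp), if_neg (by simpa using hs)]
          omega
      · rw [ih]
        apply List.map_congr_left
        intro j hj
        simp only [Function.comp]
        rw [nneA_cons_succ]
        omega

theorem nxtB_getD (lines : List String) (j : Nat) (d : Nat) (hj : j ≤ lines.length) :
    (nxtB lines 0).getD j d = nneA lines j := by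
  rw [nxtB_eq_map]
  rw [List.getD_eq_getElem?_getD, List.getElem?_map, List.getElem?_range (by omega)]
  simp

-- the two start-index lists coincide
theorem starts_eq (lines : List String) : startsA lines = startsB lines := by
  unfold startsA startsB
  rw [PySem.List.foldl_congr_mem _ _ (fun acc (p : String × Nat) =>
    if (PySem.Str.strip p.1 = "---" &&
        (nxtB lines 0).getD (p.2 + 1) lines.length < lines.length &&
        fmStart (lines.getD ((nxtB lines 0).getD (p.2 + 1) lines.length) "")) = true
    then acc ++ [p.2] else acc) _ ?_]
  · exact PySem.List.foldl_append_if _ Prod.snd _ _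
  · intro acc p hp
    have hp2 : p.2 < lines.length := by
      obtain ⟨x, i⟩ := p
      have := List.mem_zipIdx hp
      simpa using this.2.1
    have hb : (nxtB lines 0).getD (p.2 + 1) lines.length = nneA lines (p.2 + 1) :=
      nxtB_getD lines (p.2 + 1) lines.length (by omega)
    dsimp only
    rw [hb]
    by_cases h1 : PySem.Str.strip p.1 = "---"
    · rw [if_neg (by simpa using h1)]
      by_cases h2 : lines.length ≤ nneA lines (p.2 + 1)
      · have hc : ¬ ((PySem.Str.strip p.1 = "---" &&
            nneA lines (p.2 + 1) < lines.length &&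
            fmStart (lines.getD (nneA lines (p.2 + 1)) "")) = true) := by
          simp only [Bool.and_eq_true, decide_eq_true_eq]
          omega
        rw [if_pos h2, if_neg hc]
      · rw [if_neg h2]
        by_cases h3 : fmStart (lines.getD (nneA lines (p.2 + 1)) "") = true
        · have hc : (PySem.Str.strip p.1 = "---" &&
              nneA lines (p.2 + 1) < lines.length &&
              fmStart (lines.getD (nneA lines (p.2 + 1)) "")) = true := by
            simp only [Bool.and_eq_true, decide_eq_true_eq]
            exact ⟨⟨h1, by omega⟩, h3⟩
          rw [if_pos h3, if_pos hc]
        · have hc : ¬ ((PySem.Str.strip p.1 = "---" &&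
              nneA lines (p.2 + 1) < lines.length &&
              fmStart (lines.getD (nneA lines (p.2 + 1)) "")) = true) := by
            simp only [Bool.and_eq_true, decide_eq_true_eq, not_and]
            intro _ h
            exact h3 h
          rw [if_neg h3, if_neg hc]
    · have hc : ¬ ((PySem.Str.strip p.1 = "---" &&
          nneA lines (p.2 + 1) < lines.length &&
          fmStart (lines.getD (nneA lines (p.2 + 1)) "")) = true) := by
        simp only [Bool.and_eq_true, decide_eq_true_eq, not_and]
        intro hh _
        exact absurd hh.1 h1
      rw [if_pos (by simpa using h1), if_neg hc]

-- A's indexed second loop equals B's zip pairing of consecutive boundaries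
theorem buildA_eq (lines : List String) (starts : List Nat) :
    buildA lines starts
    = ((starts ++ [lines.length]).zip (starts ++ [lines.length]).tail).map (fun q =>
        rstripNl (PySem.Str.join "\n"
          (PySem.List.slice lines (some (q.1 : Int)) (some (q.2 : Int)))) ++ "\n") := by
  unfold buildA
  rw [PySem.List.foldl_append_singleton_eq_map, List.nil_append]
  apply List.ext_getElem
  · simp [List.length_zip]
  · intro k h1 h2
    simp only [List.getElem_map, List.getElem_zip, List.getElem_zipIdx, List.getElem_tail,
      Nat.zero_add]
    have hk : k < starts.length := by simpa using h1
    rw [List.getElem_append_left (by omega)]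
    by_cases hlt : k + 1 < starts.length
    · rw [if_pos hlt, List.getElem_append_left hlt, List.getD_eq_getElem _ _ hlt]
    · rw [if_neg hlt]
      have hk1' : k + 1 = starts.length := by omega
      rw [List.getElem_append_right (by omega)]
      simp [hk1']

-- ===== VERDICT (by name: the statement is the Claim_ definition above) =====
theorem split_by_front_matter_spec : Claim_equal_split_by_front_matter := by
  intro lines _
  show split_by_front_matter lines = split_by_front_matter_alt lines
  exact (congrArg (buildA lines) (starts_eq lines)).trans (buildA_eq lines (startsB lines))
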